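-- pv_equiv track=rewrite | github.com/kirankumarreddii/leetcode | 3474-better-compression-of-string/3474-better-compression-of-string.py | betterCompression
-- ===== SOURCE A (Python) =====
-- def betterCompression(compressed: str) -> str:
--     char={}
--     n=len(compressed)
--     i=0
--     j=n-1
--     while i<n:
--         if compressed[i].isalpha():
--             s=compressed[i]
--             i+=1
--             count=0
--             while i < n and compressed[i].isdigit():
--                 count=count*10+int(compressed[i])
--                 i+=1
--         char[s]=char.get(s,0)+count
--     return ''.join(ch+str(char[ch]) for ch in sorted(char))
-- ===== SOURCE B (Python) =====
-- def betterCompression(compressed: str) -> str: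
--     # tokenize into (letter, count) pairs, then accumulate into a dict, then render sorted
--     tokens = []
--     for c in compressed:
--         if c.isalpha():
--             tokens.append((c, 0))
--         else:
--             ch, v = tokens[-1]
--             tokens[-1] = (ch, v * 10 + int(c))
--     counts = {}
--     for ch, v in tokens:
--         counts[ch] = counts.get(ch, 0) + v
--     return ''.join(ch + str(counts[ch]) for ch in sorted(counts))
-- ===== Notes on version B (the rewrite author's own statement) =====
-- stated objective: alternative
-- what changed: Replaces A's index-driven state machine (an outer while over positions with a nested digit-consuming while writing into the dict as it scans) by a tokenize-then-accumulate decomposition: one pass over the characters builds a (letter, count) token list, then a separate fold accumulates the tokens into the dict before the sorted join.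
import Mathlib
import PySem

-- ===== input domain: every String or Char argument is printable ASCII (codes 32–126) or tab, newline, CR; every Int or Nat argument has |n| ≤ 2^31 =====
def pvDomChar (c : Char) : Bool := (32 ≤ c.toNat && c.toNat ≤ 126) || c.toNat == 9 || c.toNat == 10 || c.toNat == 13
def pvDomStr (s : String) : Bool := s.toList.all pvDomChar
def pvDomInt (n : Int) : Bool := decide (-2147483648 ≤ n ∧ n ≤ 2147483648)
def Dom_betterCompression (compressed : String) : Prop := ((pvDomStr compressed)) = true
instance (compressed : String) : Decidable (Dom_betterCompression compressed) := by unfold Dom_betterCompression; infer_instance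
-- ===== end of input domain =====

-- B replaces A's index-driven two-level while-loop state machine by a tokenize-then-accumulate
-- decomposition (one char pass building the (letter, count) token list, then a fold into the dict):
-- objective 'alternative'.

-- ===== PORT A =====
-- inner loop: while i < n and compressed[i].isdigit(): count = count*10 + int(compressed[i]); i += 1
-- (int(compressed[i]) ported as (ofChars? [c]).getD 0 — exact for the digit chars this branch reads)
def pvA_inner (cs : List Char) (i : Nat) (count : Int) : Nat × Int :=
  if h : i < cs.length then
    if PySem.Chars.isdigit cs[i] then
      pvA_inner cs (i + 1) (count * 10 + (PySem.Int.ofChars? [cs[i]]).getD 0)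
    else (i, count)
  else (i, count)
termination_by cs.length - i

-- outer while loop; fuel models Python's possible divergence (i does not advance on a
-- non-alpha char, so Python loops forever there; fuel = n+1 suffices on every halting input)
def pvA_loop (cs : List Char) (d : PySem.Dict Char Int) (s : Option Char) (count : Int) (i : Nat) :
    Nat → PySem.Dict Char Int
  | 0 => d
  | fuel + 1 =>
    if h : i < cs.length then
      if PySem.Chars.isalpha cs[i] then
        let s' := cs[i]
        let p := pvA_inner cs (i + 1) 0
        pvA_loop cs (d.insert s' (d.getD s' 0 + p.2)) (some s') p.2 p.1 fuel
      else
        match s with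
        | some sc => pvA_loop cs (d.insert sc (d.getD sc 0 + count)) (some sc) count i fuel
        | none => d  -- Python: UnboundLocalError (s never assigned)
    else d

def betterCompression (compressed : String) : String :=
  let cs := compressed.toList
  let char := pvA_loop cs PySem.Dict.empty none 0 0 (cs.length + 1)
  -- ''.join(ch + str(char[ch]) for ch in sorted(char))
  String.mk ((PySem.List.sorted char.keys (fun x => x) false).flatMap
    (fun ch => ch :: PySem.Int.toChars (char.getD ch 0)))

-- ===== PORT B =====
-- phase 1 of Source B: build the token list (append on a letter, modify the last pair on a digit);
-- none = IndexError on tokens[-1]; int(c) ported as (ofChars? [c]).getD 0 — exact for the digit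
-- chars this branch reads under Pre_
def pvB_tokens : List Char → List (Char × Int) → Option (List (Char × Int))
  | [], toks => some toks
  | c :: rest, toks =>
    if PySem.Chars.isalpha c then pvB_tokens rest (toks ++ [(c, 0)])
    else
      match toks.getLast? with
      | some (ch, v) =>
          pvB_tokens rest (toks.dropLast ++ [(ch, v * 10 + (PySem.Int.ofChars? [c]).getD 0)])
      | none => none

def betterCompression_alt (compressed : String) : String :=
  match pvB_tokens compressed.toList [] with
  | none => ""  -- unreachable under Pre_ (Python raises IndexError there)
  | some toks =>
    let counts := toks.foldl (fun d p => d.insert p.1 (d.getD p.1 0 + p.2)) PySem.Dict.empty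
    String.mk ((PySem.List.sorted counts.keys (fun x => x) false).flatMap
      (fun ch => ch :: PySem.Int.toChars (counts.getD ch 0)))

-- ===== PRECONDITION & SPEC =====
-- Pre_ excludes exactly the strings that are not a sequence of letter-then-digit-run tokens:
-- on those A never returns (UnboundLocalError when the first char is not a letter, otherwise
-- an infinite loop at the first char that is neither letter nor digit).
def Pre_betterCompression (compressed : String) : Prop :=
  compressed.toList.all (fun c => PySem.Chars.isalpha c || PySem.Chars.isdigit c) = true ∧
  compressed.toList.head?.all PySem.Chars.isalpha = true

instance (compressed : String) : Decidable (Pre_betterCompression compressed) := by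
  unfold Pre_betterCompression; infer_instance

def pvWitness_betterCompression : String := "a2b10a3"

def Spec_betterCompression (compressed : String) (out : String) : Prop := out = betterCompression_alt compressed
instance (compressed : String) (out : String) : Decidable (Spec_betterCompression compressed out) := by unfold Spec_betterCompression; infer_instance

-- ===== CLAIM (what is proved, stated in full; the proofs are below) =====
def Claim_equal_betterCompression : Prop := ∀ (compressed : String), Dom_betterCompression compressed → Pre_betterCompression compressed → Spec_betterCompression compressed (betterCompression compressed)

-- ===== LEMMAS AND PROOFS =====

-- the common token decomposition of a well-formed string
def pvTokVal (ds : List Char) : Int :=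
  ds.foldl (fun a c => a * 10 + (PySem.Int.ofChars? [c]).getD 0) 0

def pvToks : List Char → List (Char × Int)
  | [] => []
  | c :: rest =>
      (c, pvTokVal (rest.takeWhile PySem.Chars.isdigit)) ::
        pvToks (rest.dropWhile PySem.Chars.isdigit)
termination_by l => l.length
decreasing_by
  simpa using Nat.lt_succ_of_le (List.length_dropWhile_le _ rest)

def pvStep (d : PySem.Dict Char Int) (p : Char × Int) : PySem.Dict Char Int :=
  d.insert p.1 (d.getD p.1 0 + p.2)

-- a digit is never a letter
theorem pv_digit_not_alpha (c : Char) (h : PySem.Chars.isdigit c = true) :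
    PySem.Chars.isalpha c = false := by
  simp [PySem.Chars.isdigit, Char.le_def, UInt32.le_iff_toNat_le] at h
  simp [PySem.Chars.isalpha, PySem.Chars.isupper, PySem.Chars.islower, Char.le_def,
    UInt32.le_iff_toNat_le]
  omega

theorem pv_head?_dropWhile_false {α : Type} (p : α → Bool) (l : List α) (c : α)
    (h : (l.dropWhile p).head? = some c) : p c = false := by
  have w : l.dropWhile p ≠ [] := by intro e; rw [e] at h; simp at h
  have hh := List.head_dropWhile_not p w
  rw [List.head?_eq_head w] at h
  injection h with h'
  rw [← h']; exact hh

theorem pvA_inner_spec (cs : List Char) : ∀ (ds rest : List Char) (i : Nat) (count : Int),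
    cs.drop i = ds ++ rest →
    (∀ c ∈ ds, PySem.Chars.isdigit c = true) →
    (∀ c, rest.head? = some c → PySem.Chars.isdigit c = false) →
    pvA_inner cs i count =
      (i + ds.length, ds.foldl (fun a c => a * 10 + (PySem.Int.ofChars? [c]).getD 0) count) := by
  intro ds
  induction ds with
  | nil =>
    intro rest i count hsplit hds hrest
    rw [pvA_inner]
    split
    · next h =>
      have hget : cs[i]? = rest.head? := by
        rw [← List.head?_drop, hsplit]; rfl
      have hsome : cs[i]? = some cs[i] := List.getElem?_eq_getElem h
      rcases hr : rest.head? with _ | c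
      · rw [hr] at hget; rw [hget] at hsome; exact absurd hsome (by simp)
      · rw [hr] at hget; rw [hget] at hsome
        have hc : cs[i] = c := Option.some.inj hsome.symm
        rw [if_neg (by simp [hc, hrest c hr])]
        simp
    · simp
  | cons d ds' ih =>
    intro rest i count hsplit hds hrest
    have hget : cs[i]? = some d := by
      rw [← List.head?_drop, hsplit]; rfl
    obtain ⟨hlt, hcsi⟩ := List.getElem?_eq_some_iff.mp hget
    rw [pvA_inner, dif_pos hlt, hcsi, if_pos (hds d (by simp))]
    have hsplit' : cs.drop (i + 1) = ds' ++ rest := by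
      rw [← List.tail_drop, hsplit]; rfl
    rw [ih rest (i + 1) _ hsplit' (fun c hc => hds c (by simp [hc])) hrest]
    refine Prod.ext ?_ ?_
    · simp; omega
    · simp [List.foldl_cons]

theorem pvA_loop_spec (cs : List Char)
    (hall : ∀ c ∈ cs, PySem.Chars.isalpha c = true ∨ PySem.Chars.isdigit c = true) :
    ∀ fuel i (d : PySem.Dict Char Int) s count, (cs.drop i).length ≤ fuel →
    (∀ c, (cs.drop i).head? = some c → PySem.Chars.isalpha c = true) →
    pvA_loop cs d s count i fuel = (pvToks (cs.drop i)).foldl pvStep d := by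
  intro fuel
  induction fuel with
  | zero =>
    intro i d s count hlen hhead
    have hnil : cs.drop i = [] := List.eq_nil_of_length_eq_zero (Nat.le_zero.mp hlen)
    rw [hnil]
    simp [pvA_loop, pvToks]
  | succ fuel ih =>
    intro i d s count hlen hhead
    rcases hdrop : cs.drop i with _ | ⟨c, rest2⟩
    · have hge : ¬ i < cs.length := by
        have := List.drop_eq_nil_iff.mp hdrop; omega
      rw [pvA_loop.eq_def]
      simp only [dif_neg hge]
      simp [pvToks]
    · have hgetc : cs[i]? = some c := by
        rw [← List.head?_drop, hdrop]; rfl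
      obtain ⟨hlt, hcsi⟩ := List.getElem?_eq_some_iff.mp hgetc
      have halpha : PySem.Chars.isalpha c = true := hhead c (by rw [hdrop]; rfl)
      have htail : cs.drop (i + 1) = rest2 := by
        rw [← List.tail_drop, hdrop]; rfl
      have hsplit : cs.drop (i + 1) =
          rest2.takeWhile PySem.Chars.isdigit ++ rest2.dropWhile PySem.Chars.isdigit := by
        rw [htail, List.takeWhile_append_dropWhile]
      have hinner := pvA_inner_spec cs (rest2.takeWhile PySem.Chars.isdigit)
        (rest2.dropWhile PySem.Chars.isdigit) (i + 1) 0 hsplit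
        (fun c' hc' => List.mem_takeWhile_imp hc')
        (fun c' hc' => pv_head?_dropWhile_false _ _ _ hc')
      have hdropnext : cs.drop (i + 1 + (rest2.takeWhile PySem.Chars.isdigit).length) =
          rest2.dropWhile PySem.Chars.isdigit := by
        rw [← List.drop_drop, hsplit, List.drop_left]
      rw [pvA_loop.eq_def]
      simp only [dif_pos hlt, hcsi, if_pos halpha]
      simp only [hinner]
      rw [ih (i + 1 + (rest2.takeWhile PySem.Chars.isdigit).length) _ _ _
        (by
          rw [hdropnext]
          have h1 : (cs.drop i).length ≤ fuel + 1 := hlen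
          rw [hdrop] at h1
          have h2 := List.length_dropWhile_le PySem.Chars.isdigit rest2
          simp at h1; omega)
        (by
          intro c' hc'
          rw [hdropnext] at hc'
          have hmem : c' ∈ cs := by
            have : c' ∈ cs.drop (i + 1 + (rest2.takeWhile PySem.Chars.isdigit).length) := by
              rw [hdropnext]; exact List.mem_of_mem_head? hc'
            exact List.mem_of_mem_drop this
          rcases hall c' hmem with h | h
          · exact h
          · exact absurd h (by rw [pv_head?_dropWhile_false _ _ _ hc']; simp))]
      rw [hdropnext, pvToks, List.foldl_cons]
      simp [pvStep, pvTokVal]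

theorem pvB_digits (ds : List Char) (hds : ∀ c ∈ ds, PySem.Chars.isdigit c = true) :
    ∀ (rest : List Char) (acc : List (Char × Int)) (ch : Char) (v : Int),
      pvB_tokens (ds ++ rest) (acc ++ [(ch, v)]) =
      pvB_tokens rest
        (acc ++ [(ch, ds.foldl (fun a c => a * 10 + (PySem.Int.ofChars? [c]).getD 0) v)]) := by
  induction ds with
  | nil => intro rest acc ch v; simp
  | cons d ds' ih =>
    intro rest acc ch v
    have hna : PySem.Chars.isalpha d = false :=
      pv_digit_not_alpha d (hds d (by simp))
    rw [List.cons_append, pvB_tokens]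
    rw [if_neg (by simp [hna]), List.getLast?_concat]
    simp only [List.dropLast_concat]
    rw [ih (fun c hc => hds c (by simp [hc])) rest acc ch _]
    simp [List.foldl_cons]

theorem pvB_tokens_spec : ∀ (n : Nat) (cs : List Char), cs.length ≤ n →
    (∀ c ∈ cs, PySem.Chars.isalpha c = true ∨ PySem.Chars.isdigit c = true) →
    (∀ c, cs.head? = some c → PySem.Chars.isalpha c = true) →
    ∀ acc, pvB_tokens cs acc = some (acc ++ pvToks cs) := by
  intro n
  induction n with
  | zero =>
    intro cs hlen _ _ acc
    have : cs = [] := List.eq_nil_of_length_eq_zero (Nat.le_zero.mp hlen)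
    subst this; simp [pvB_tokens, pvToks]
  | succ n ih =>
    intro cs hlen hall hhead acc
    rcases cs with _ | ⟨c, rest⟩
    · simp [pvB_tokens, pvToks]
    · have halpha : PySem.Chars.isalpha c = true := hhead c rfl
      rw [pvB_tokens, if_pos halpha]
      have hrest : rest = rest.takeWhile PySem.Chars.isdigit ++
          rest.dropWhile PySem.Chars.isdigit := (List.takeWhile_append_dropWhile).symm
      rw [show pvB_tokens rest (acc ++ [(c, 0)]) =
            pvB_tokens (rest.takeWhile PySem.Chars.isdigit ++
              rest.dropWhile PySem.Chars.isdigit) (acc ++ [(c, 0)]) by rw [← hrest]]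
      rw [pvB_digits _ (fun c' hc' => List.mem_takeWhile_imp hc') _ acc c 0]
      rw [ih (rest.dropWhile PySem.Chars.isdigit)
        (by
          have h2 := List.length_dropWhile_le PySem.Chars.isdigit rest
          simp at hlen; omega)
        (by
          intro c' hc'
          exact hall c' (by
            have : c' ∈ rest := (List.dropWhile_sublist _).subset hc'
            simp [this]))
        (by
          intro c' hc'
          have hmem : c' ∈ rest := (List.dropWhile_sublist _).subset (List.mem_of_mem_head? hc')
          rcases hall c' (by simp [hmem]) with h | h
          · exact h
          · exact absurd h (by rw [pv_head?_dropWhile_false _ _ _ hc']; simp))]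
      rw [pvToks]
      simp [pvTokVal, List.append_assoc]

-- ===== VERDICT (by name: the statement is the Claim_ definition above) =====
theorem betterCompression_spec : Claim_equal_betterCompression := by
  intro compressed _hdom hpre
  obtain ⟨hall, hhead⟩ := hpre
  have hall' : ∀ c ∈ compressed.toList,
      PySem.Chars.isalpha c = true ∨ PySem.Chars.isdigit c = true := by
    intro c hc
    rcases Bool.or_eq_true_iff.mp (List.all_eq_true.mp hall c hc) with h | h
    · exact Or.inl h
    · exact Or.inr h
  have hhead' : ∀ c, compressed.toList.head? = some c → PySem.Chars.isalpha c = true := by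
    intro c hc; rw [hc] at hhead; simpa using hhead
  unfold Spec_betterCompression betterCompression betterCompression_alt
  rw [pvB_tokens_spec compressed.toList.length compressed.toList le_rfl hall' hhead' []]
  have hA := pvA_loop_spec compressed.toList hall' (compressed.toList.length + 1) 0
    PySem.Dict.empty none 0 (by simp) (by simpa using hhead')
  simp only [List.drop_zero] at hA
  have hstep : pvStep = fun (d : PySem.Dict Char Int) (p : Char × Int) =>
      d.insert p.1 (d.getD p.1 0 + p.2) := rfl
  simp only [hA, hstep, List.nil_append]
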